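-- pv_equiv track=rewrite | github.com/itsmeimtom/console-train-map | main.py | giveUsAMap
-- ===== SOURCE A (Python) =====
-- spaces = 1
--
-- usePoles = False
--
-- colourHighlight = "\033[1;36;40m" # cyan
--
-- colourPassed = "\033[1;30;40m" # dark grey
--
-- colourFuture = "\033[1;37;40m" # white
--
-- def giveUsAMap(stations, stationsPassed, stationToHL):
--     output = ""
--     totalStations = len(stations)
--
--     for line in range(totalStations):
--         output += "\n"
--
--         for pole in range(line):
--             if usePoles == True:
--                 colour = colourPassed
--                 if pole == stationToHL:
--                     colour = colourHighlight
--                 elif pole >= stationsPassed: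
--                     colour = colourFuture
--                 output += "%s|%s"%(colour," "*spaces)
--             else:
--                 output += "%s"%(" "*spaces)
--
--         # do current station name
--         if line == stationToHL:
--             colour = colourHighlight
--         elif line < stationsPassed:
--             colour = colourPassed
--         else:
--             colour = colourFuture
--
--         # output += "%s/%s"%(colour,stations[line].strip())
--         output += "%s\\ %s%s"%(colour,stations[line].strip(),colour)
--
--     return output
-- ===== SOURCE B (Python) =====
-- spaces = 1
--
-- colourHighlight = "\033[1;36;40m" # cyan
-- colourPassed = "\033[1;30;40m" # dark grey
-- colourFuture = "\033[1;37;40m" # white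
--
-- def giveUsAMap(stations, stationsPassed, stationToHL):
--     lines = []
--     for i, name in enumerate(stations):
--         if i == stationToHL:
--             colour = colourHighlight
--         elif i < stationsPassed:
--             colour = colourPassed
--         else:
--             colour = colourFuture
--         lines.append("\n" + " " * (spaces * i) + "%s\\ %s%s" % (colour, name.strip(), colour))
--     return "".join(lines)
-- ===== Notes on version B (the rewrite author's own statement) =====
-- stated objective: simpler
-- what changed: B replaces A's nested index loops with repeated string accumulation by a single enumerate pass that builds one line per station (closed-form space prefix instead of the inner pole loop, whose dead usePoles branch is dropped) and joins the lines at the end.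
import Mathlib
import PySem

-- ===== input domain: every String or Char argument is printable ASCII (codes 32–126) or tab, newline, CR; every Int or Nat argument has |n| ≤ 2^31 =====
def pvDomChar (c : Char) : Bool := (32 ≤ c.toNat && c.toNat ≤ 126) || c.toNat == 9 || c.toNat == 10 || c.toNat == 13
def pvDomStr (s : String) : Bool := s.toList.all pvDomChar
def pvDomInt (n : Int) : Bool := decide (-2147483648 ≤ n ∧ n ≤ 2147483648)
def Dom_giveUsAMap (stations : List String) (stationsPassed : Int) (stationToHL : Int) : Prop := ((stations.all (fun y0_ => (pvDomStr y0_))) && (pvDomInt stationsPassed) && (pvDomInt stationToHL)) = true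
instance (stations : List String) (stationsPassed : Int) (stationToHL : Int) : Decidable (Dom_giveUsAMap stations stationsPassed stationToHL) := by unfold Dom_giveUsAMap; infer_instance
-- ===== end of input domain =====

-- B builds one line per station in a single enumerate pass (closed-form space prefix) and joins them,
-- instead of A's nested index loops accumulating into one string; same return value.

-- module constants
def pvSpaces : Int := 1
def pvUsePoles : Bool := false
def pvColourHighlight : String := "\x1b[1;36;40m"
def pvColourPassed : String := "\x1b[1;30;40m"
def pvColourFuture : String := "\x1b[1;37;40m"

-- ===== PORT A =====
-- 'for pole in range(line)' body (usePoles branch kept literally)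
def pvPoleStep (stationsPassed stationToHL : Int) (o : String) (pole : Int) : String :=
  if pvUsePoles = true then
    let colour := pvColourPassed
    let colour :=
      if pole = stationToHL then pvColourHighlight
      else if pole ≥ stationsPassed then pvColourFuture
      else colour
    o ++ (colour ++ "|" ++ String.ofList (List.replicate pvSpaces.toNat ' '))
  else
    o ++ String.ofList (List.replicate pvSpaces.toNat ' ')

-- 'for line in range(totalStations)' body
def pvLineStep (stations : List String) (stationsPassed stationToHL : Int)
    (output : String) (line : Int) : String :=
  let output := output ++ "\n"
  let output := (PySem.List.pyRange 0 line 1).foldl (pvPoleStep stationsPassed stationToHL) output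
  let colour :=
    if line = stationToHL then pvColourHighlight
    else if line < stationsPassed then pvColourPassed
    else pvColourFuture
  output ++ (colour ++ "\\ " ++ PySem.Str.strip (PySem.List.pyGetD stations line "") ++ colour)

def giveUsAMap (stations : List String) (stationsPassed : Int) (stationToHL : Int) : String :=
  let totalStations : Int := stations.length
  (PySem.List.pyRange 0 totalStations 1).foldl (pvLineStep stations stationsPassed stationToHL) ""

-- ===== PORT B =====
-- one line of the map, from an (index, name) pair of enumerate(stations)
def pvLineOf (stationsPassed stationToHL : Int) (p : Int × String) : String :=
  let colour :=
    if p.1 = stationToHL then pvColourHighlight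
    else if p.1 < stationsPassed then pvColourPassed
    else pvColourFuture
  "\n" ++ String.ofList (List.replicate (pvSpaces * p.1).toNat ' ')
      ++ (colour ++ "\\ " ++ PySem.Str.strip p.2 ++ colour)

def giveUsAMap_alt (stations : List String) (stationsPassed : Int) (stationToHL : Int) : String :=
  PySem.Str.join "" ((PySem.List.enumerate stations 0).map (pvLineOf stationsPassed stationToHL))

-- ===== PRECONDITION & SPEC =====
def Spec_giveUsAMap (stations : List String) (stationsPassed : Int) (stationToHL : Int) (out : String) : Prop := out = giveUsAMap_alt stations stationsPassed stationToHL
instance (stations : List String) (stationsPassed : Int) (stationToHL : Int) (out : String) : Decidable (Spec_giveUsAMap stations stationsPassed stationToHL out) := by unfold Spec_giveUsAMap; infer_instance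

-- ===== CLAIM (what is proved, stated in full; the proofs are below) =====
def Claim_equal_giveUsAMap : Prop := ∀ (stations : List String) (stationsPassed : Int) (stationToHL : Int), Dom_giveUsAMap stations stationsPassed stationToHL → Spec_giveUsAMap stations stationsPassed stationToHL (giveUsAMap stations stationsPassed stationToHL)

-- ===== LEMMAS AND PROOFS =====

-- "".join(x :: xs) = x ++ "".join(xs)
theorem pv_chars_join_nil : ∀ (ls : List (List Char)), PySem.Chars.join [] ls = ls.flatten := by
  intro ls
  induction ls with
  | nil => rfl
  | cons x xs ih =>
      cases xs with
      | nil => simp [PySem.Chars.join, List.intercalate]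
      | cons y t =>
          rw [PySem.Chars.join_cons_cons]
          simp only [List.flatten_cons, ← ih]
          simp

theorem pv_join_cons (x : String) (xs : List String) :
    PySem.Str.join "" (x :: xs) = x ++ PySem.Str.join "" xs := by
  apply String.toList_injective
  simp [pv_chars_join_nil]

-- a fold that appends g x for each x equals the accumulator followed by the join of the mapped list
theorem pv_foldl_append_join {α : Type} (g : α → String) :
    ∀ (l : List α) (a : String),
      l.foldl (fun o x => o ++ g x) a = a ++ PySem.Str.join "" (l.map g) := by
  intro l
  induction l with
  | nil =>
      intro a
      apply String.toList_injective
      simp [pv_chars_join_nil]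
  | cons x xs ih =>
      intro a
      simp only [List.foldl_cons, List.map_cons, pv_join_cons, ih (a ++ g x)]
      apply String.toList_injective
      simp

-- the inner pole loop is the closed-form space prefix
theorem pv_pole_fold (stationsPassed stationToHL : Int) :
    ∀ (l : List Int) (a : String),
      l.foldl (pvPoleStep stationsPassed stationToHL) a
        = a ++ String.ofList (List.replicate l.length ' ') := by
  intro l
  induction l with
  | nil =>
      intro a
      apply String.toList_injective
      simp
  | cons x xs ih =>
      intro a
      simp only [List.foldl_cons]
      have hstep : pvPoleStep stationsPassed stationToHL a x = a ++ " " := by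
        simp [pvPoleStep, pvUsePoles, pvSpaces]
      rw [hstep, ih]
      apply String.toList_injective
      simp [List.replicate_succ]

-- A's line body appends pvLineOf of the corresponding enumerate pair
theorem pv_lineStep_eq (stations : List String) (stationsPassed stationToHL : Int)
    (output : String) (line : Int) (hline : 0 ≤ line) :
    pvLineStep stations stationsPassed stationToHL output line
      = output ++ pvLineOf stationsPassed stationToHL (line, PySem.List.pyGetD stations line "") := by
  apply String.toList_injective
  simp [pvLineStep, pvLineOf, pv_pole_fold, PySem.List.length_pyRange_one, pvSpaces]

theorem giveUsAMap_eq_alt (stations : List String) (stationsPassed stationToHL : Int) :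
    giveUsAMap stations stationsPassed stationToHL
      = giveUsAMap_alt stations stationsPassed stationToHL := by
  unfold giveUsAMap giveUsAMap_alt
  rw [PySem.List.enumerate_eq_map_pyRange (d := "")]
  rw [List.map_map]
  have hcongr :
      (PySem.List.pyRange 0 (stations.length : Int) 1).foldl
          (pvLineStep stations stationsPassed stationToHL) ""
        = (PySem.List.pyRange 0 (stations.length : Int) 1).foldl
            (fun o line => o ++ pvLineOf stationsPassed stationToHL (line, PySem.List.pyGetD stations line "")) "" := by
    apply PySem.List.foldl_congr_mem
    intro a x hx
    have hx0 : 0 ≤ x := ((PySem.List.mem_pyRange_one).1 hx).1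
    exact pv_lineStep_eq stations stationsPassed stationToHL a x hx0
  rw [hcongr, pv_foldl_append_join (fun line => pvLineOf stationsPassed stationToHL (line, PySem.List.pyGetD stations line ""))]
  apply String.toList_injective
  simp [Function.comp_def]

-- ===== VERDICT (by name: the statement is the Claim_ definition above) =====
theorem giveUsAMap_spec : Claim_equal_giveUsAMap := by
  intro stations stationsPassed stationToHL _
  unfold Spec_giveUsAMap
  exact giveUsAMap_eq_alt stations stationsPassed stationToHL
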